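-- pv_equiv track=rewrite | github.com/MarkusHelm/AutoLight | color.py | getClosestHueIndex
-- ===== SOURCE A (Python) =====
-- colorHues = [0, 30, 60, 120, 160, 200, 240, 270, 300, 360]
--
-- def getClosestHueIndex(hue: int) -> int:
--     if hue < 0 or hue > 360: return 0
--     for index, colorHue in enumerate(colorHues):
--         if (hue == colorHue): return index
--         if (hue > colorHue): continue
--         if ((colorHue - hue) < (hue - colorHues[index - 1])):
--             return index if (index < len(colorHues) - 1) else 0
--         else: return index - 1
-- ===== SOURCE B (Python) =====
-- colorHues = [0, 30, 60, 120, 160, 200, 240, 270, 300, 360]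
--
-- def getClosestHueIndex(hue: int) -> int:
--     if hue < 0 or hue > 360:
--         return 0
--     idx = min(range(len(colorHues)), key=lambda i: abs(colorHues[i] - hue))
--     if idx == len(colorHues) - 1 and hue != 360:
--         return 0
--     return idx
-- ===== Notes on version B (the rewrite author's own statement) =====
-- stated objective: simpler
-- what changed: Replaced A's neighbour-bracketing scan over enumerate (comparing each hue to the previous entry and branching on insertion position) by a single argmin over indices keyed by absolute distance (first minimum = lower tie-break), followed by the same full-circle wrap rule at the last index.
import Mathlib
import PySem

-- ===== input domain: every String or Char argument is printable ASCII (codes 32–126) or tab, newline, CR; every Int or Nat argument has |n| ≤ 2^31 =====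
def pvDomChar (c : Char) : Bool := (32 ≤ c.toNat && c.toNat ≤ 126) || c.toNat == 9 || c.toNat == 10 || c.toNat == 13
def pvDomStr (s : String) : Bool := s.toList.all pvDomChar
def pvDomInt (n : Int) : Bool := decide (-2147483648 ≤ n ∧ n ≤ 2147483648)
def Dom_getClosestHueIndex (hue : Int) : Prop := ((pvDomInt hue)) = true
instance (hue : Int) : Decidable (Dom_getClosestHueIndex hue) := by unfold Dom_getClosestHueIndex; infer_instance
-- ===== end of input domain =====

-- B replaces A's neighbour-bracketing scan by a single argmin over the indices
-- (first minimum = lower tie), then applies the same 360≡0 wrap rule; objective: simpler.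

-- ===== PORT A =====
def colorHuesA : List Int := [0, 30, 60, 120, 160, 200, 240, 270, 300, 360]

-- the for-loop over enumerate(colorHues); [] => 0 is unreachable (the guard
-- ensures hue ≤ 360 = last element, so the loop always returns in Python).
-- colorHues[index - 1] is PySem.List.pyGetD (always in range: -1 ≤ index-1 < 10).
def aLoop (hue : Int) : List (Int × Int) → Int
  | [] => 0
  | (index, colorHue) :: rest =>
    if hue == colorHue then index
    else if hue > colorHue then aLoop hue rest
    else if (colorHue - hue) < (hue - PySem.List.pyGetD colorHuesA (index - 1) 0) then
      (if index < (colorHuesA.length : Int) - 1 then index else 0)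
    else index - 1

def getClosestHueIndex (hue : Int) : Int :=
  if hue < 0 ∨ hue > 360 then 0
  else aLoop hue (PySem.List.enumerate colorHuesA 0)

-- ===== PORT B =====
def colorHuesB : List Int := [0, 30, 60, 120, 160, 200, 240, 270, 300, 360]

def getClosestHueIndex_alt (hue : Int) : Int :=
  if hue < 0 ∨ hue > 360 then 0
  else
    -- idx = min(range(len(colorHues)), key=lambda i: abs(colorHues[i] - hue));
    -- none is unreachable (the range is nonempty)
    match PySem.List.min? (PySem.List.pyRange 0 (colorHuesB.length : Int) 1)
        (fun i => |PySem.List.pyGetD colorHuesB i 0 - hue|) with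
    | none => 0
    | some idx =>
      if idx = (colorHuesB.length : Int) - 1 ∧ hue ≠ 360 then 0 else idx

-- ===== PRECONDITION & SPEC =====
def Spec_getClosestHueIndex (hue : Int) (out : Int) : Prop := out = getClosestHueIndex_alt hue
instance (hue : Int) (out : Int) : Decidable (Spec_getClosestHueIndex hue out) := by unfold Spec_getClosestHueIndex; infer_instance

-- ===== CLAIM (what is proved, stated in full; the proofs are below) =====
def Claim_equal_getClosestHueIndex : Prop := ∀ (hue : Int), Dom_getClosestHueIndex hue → Spec_getClosestHueIndex hue (getClosestHueIndex hue)

-- ===== LEMMAS AND PROOFS =====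

-- In range [0, 360] the two ports agree; the 361 cases are checked by the kernel.
set_option maxRecDepth 4096 in
theorem agree_in_range : ∀ n ∈ List.range 361,
    getClosestHueIndex (n : Int) = getClosestHueIndex_alt (n : Int) := by decide

-- ===== VERDICT (by name: the statement is the Claim_ definition above) =====
theorem getClosestHueIndex_spec : Claim_equal_getClosestHueIndex := by
  intro hue _
  unfold Spec_getClosestHueIndex
  by_cases h : hue < 0 ∨ hue > 360
  · simp [getClosestHueIndex, getClosestHueIndex_alt, h]
  · have h0 : hue = ((hue.toNat : Nat) : Int) := by omega
    rw [h0]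
    exact (agree_in_range hue.toNat (by simp [List.mem_range]; omega))
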